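-- pv_equiv track=rewrite | github.com/GeorgeMugale/Python-Chatbot | AUTO.py | simplifyParagraph
-- ===== SOURCE A (Python) =====
-- def simplifyParagraph(string):
--
--     char = ""
--     pos = 0
--     count = 0
--     for i in range(len(string)) :
--         pos+=1
--         if string[i] == ".":
--             count+=1
--         if count == 4 :
--             break
--
--     return string[0:pos]
-- ===== SOURCE B (Python) =====
-- def simplifyParagraph(string):
--     parts = string.split('.', 4)
--     if len(parts) < 5:
--         return string
--     return '.'.join(parts[:4]) + '.'
-- ===== Notes on version B (the rewrite author's own statement) =====
-- stated objective: faster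
-- what changed: Replaces the per-character index loop that counts periods and tracks a cut position with one split('.', 4) and a rejoin of the first four segments plus the trailing period.
import Mathlib
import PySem

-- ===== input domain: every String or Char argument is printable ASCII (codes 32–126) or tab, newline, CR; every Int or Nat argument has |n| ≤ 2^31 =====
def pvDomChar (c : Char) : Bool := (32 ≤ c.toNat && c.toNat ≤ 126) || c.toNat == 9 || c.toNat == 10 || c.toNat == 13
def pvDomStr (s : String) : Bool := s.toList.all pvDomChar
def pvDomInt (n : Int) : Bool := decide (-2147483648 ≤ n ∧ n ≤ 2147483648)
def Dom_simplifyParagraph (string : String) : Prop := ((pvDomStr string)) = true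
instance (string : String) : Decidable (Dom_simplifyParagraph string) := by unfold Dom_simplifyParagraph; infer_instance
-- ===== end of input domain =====

-- B replaces A's per-character scan-and-count cut loop by one split('.', 4) plus a rejoin
-- of the first four segments; a timing run measured B faster (constant-factor:
-- C-level split instead of a per-character Python loop).

-- ===== PORT A =====
-- the for-loop of A: walks the characters, pos counts steps, count counts '.',
-- breaks as soon as count reaches 4; returns the final pos
def simplifyParagraphLoop : List Char → Nat → Nat → Nat
  | [], pos, _count => pos
  | c :: rest, pos, count =>
    let pos' := pos + 1
    let count' := if c = '.' then count + 1 else count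
    if count' = 4 then pos' else simplifyParagraphLoop rest pos' count'

def simplifyParagraph (string : String) : String :=
  let pos := simplifyParagraphLoop string.toList 0 0
  PySem.Str.slice string (some 0) (some (pos : Int))

-- ===== PORT B =====
def simplifyParagraph_alt (string : String) : String :=
  let parts := PySem.Chars.splitOnMax string.toList ['.'] 4   -- string.split('.', 4)
  if parts.length < 5 then string
  else String.ofList (PySem.Chars.join ['.'] (PySem.List.slice parts none (some 4)) ++ ['.'])

-- ===== PRECONDITION & SPEC =====
def Spec_simplifyParagraph (string : String) (out : String) : Prop := out = simplifyParagraph_alt string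
instance (string : String) (out : String) : Decidable (Spec_simplifyParagraph string out) := by unfold Spec_simplifyParagraph; infer_instance

-- ===== CLAIM (what is proved, stated in full; the proofs are below) =====
def Claim_equal_simplifyParagraph : Prop := ∀ (string : String), Dom_simplifyParagraph string → Spec_simplifyParagraph string (simplifyParagraph string)

-- ===== LEMMAS AND PROOFS =====

-- reference function: the prefix of l up to and including its k-th period
-- (the whole of l if it has fewer than k periods)
def pvCut : List Char → Nat → List Char
  | [], _ => []
  | c :: rest, k =>
    if c = '.' then (if k = 1 then ['.'] else '.' :: pvCut rest (k - 1))
    else c :: pvCut rest k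

-- fuel-free model of PySem.Chars.splitOnMax.go for sep = ['.']
def pvParts : Nat → List Char → List Char → List (List Char)
  | _, [], cur => [cur.reverse]
  | 0, c :: rest, cur => [cur.reverse ++ (c :: rest)]
  | m + 1, c :: rest, cur =>
    if c = '.' then cur.reverse :: pvParts m rest [] else pvParts (m + 1) rest (c :: cur)

theorem pvLoop_pos (cs : List Char) : ∀ pos count,
    simplifyParagraphLoop cs pos count = pos + simplifyParagraphLoop cs 0 count := by
  induction cs with
  | nil => intro pos count; simp [simplifyParagraphLoop]
  | cons c rest ih =>
    intro pos count
    simp only [simplifyParagraphLoop]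
    split_ifs with h1 h2
    · omega
    · rw [ih (pos + 1), ih (0 + 1)]; omega
    · omega
    · rw [ih (pos + 1), ih (0 + 1)]; omega

theorem pvA_eq_cut (cs : List Char) : ∀ count, count < 4 →
    List.take (simplifyParagraphLoop cs 0 count) cs = pvCut cs (4 - count) := by
  induction cs with
  | nil => intro count _; simp [simplifyParagraphLoop, pvCut]
  | cons c rest ih =>
    intro count hc
    simp only [simplifyParagraphLoop, pvCut]
    by_cases hdot : c = '.'
    · simp only [hdot, if_pos]
      by_cases h4 : count + 1 = 4
      · have h1 : 4 - count = 1 := by omega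
        simp [h4, h1]
      · have h1 : ¬ (4 - count = 1) := by omega
        rw [if_neg h4, if_neg h1, pvLoop_pos, Nat.add_comm, List.take_succ_cons,
          ih (count + 1) (by omega), Nat.sub_sub]
    · simp only [if_neg hdot]
      have h4 : ¬ (count = 4) := by omega
      rw [if_neg h4, pvLoop_pos, Nat.add_comm, List.take_succ_cons, ih count hc]

theorem pvGo_eq_parts : ∀ (fuel : Nat) (l : List Char) (m : Nat) (cur : List Char)
    (acc : List (List Char)), l.length < fuel →
    PySem.Chars.splitOnMax.go ['.'] fuel m l cur acc = acc.reverse ++ pvParts m l cur := by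
  intro fuel
  induction fuel with
  | zero => intro l m cur acc h; omega
  | succ n ih =>
    intro l m cur acc h
    match l with
    | [] => simp [PySem.Chars.splitOnMax.go, pvParts]
    | c :: rest =>
      match m with
      | 0 => simp [PySem.Chars.splitOnMax.go, pvParts]
      | m + 1 =>
        simp only [PySem.Chars.splitOnMax.go]
        by_cases hdot : c = '.'
        · subst hdot
          have hpre : List.isPrefixOf ['.'] ('.' :: rest) = true := by
            simp [List.isPrefixOf]
          simp only [hpre, if_pos]
          rw [if_neg (by omega : ¬ (m + 1 = 0))]
          simp only [List.drop_succ_cons, List.drop_zero, List.length_singleton]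
          rw [ih rest (m + 1 - 1) [] (cur.reverse :: acc) (by
            simp only [List.length_cons] at h; omega)]
          simp [pvParts]
        · have hpre : List.isPrefixOf ['.'] (c :: rest) = false := by
            simp [List.isPrefixOf]; exact fun h => absurd h.symm hdot
          rw [if_neg (by omega : ¬ (m + 1 = 0)), hpre]
          simp only [Bool.false_eq_true, if_false]
          rw [ih rest (m + 1) (c :: cur) acc (by
            simp only [List.length_cons] at h; omega)]
          rw [pvParts, if_neg hdot]

theorem pvParts_length : ∀ (l : List Char) (m : Nat) (cur : List Char),
    (pvParts m l cur).length = 1 + min m (l.count '.') := by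
  intro l
  induction l with
  | nil => intro m cur; simp [pvParts]
  | cons c rest ih =>
    intro m cur
    match m with
    | 0 => simp [pvParts]
    | m + 1 =>
      by_cases hdot : c = '.'
      · subst hdot
        rw [pvParts, if_pos rfl, List.length_cons, ih, List.count_cons_self]
        omega
      · rw [pvParts, if_neg hdot, ih, List.count_cons_of_ne (by simpa using hdot)]

theorem pvJoin_take_eq_cut : ∀ (l : List Char) (k : Nat) (cur : List Char),
    1 ≤ k → k ≤ l.count '.' →
    PySem.Chars.join ['.'] (List.take k (pvParts k l cur)) ++ ['.'] = cur.reverse ++ pvCut l k := by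
  intro l
  induction l with
  | nil => intro k cur h1 h2; simp at h2; omega
  | cons c rest ih =>
    intro k cur h1 h2
    by_cases hdot : c = '.'
    · subst hdot
      match k with
      | 1 =>
        rw [pvParts, if_pos rfl, pvCut, if_pos rfl, if_pos rfl]
        simp [PySem.Chars.join_singleton]
      | k + 2 =>
        have hcnt : k + 1 ≤ rest.count '.' := by
          rw [List.count_cons_self] at h2; omega
        rw [pvParts, if_pos rfl, pvCut, if_pos rfl,
          if_neg (by omega : ¬ (k + 2 = 1)), List.take_succ_cons]
        obtain ⟨p, ps, hps⟩ : ∃ p ps, List.take (k + 1) (pvParts (k + 1) rest []) = p :: ps := by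
          have hlen : (pvParts (k + 1) rest []).length = 1 + min (k + 1) (rest.count '.') :=
            pvParts_length rest (k + 1) []
          cases htk : List.take (k + 1) (pvParts (k + 1) rest []) with
          | nil =>
            exfalso
            have hlt := congrArg List.length htk
            rw [List.length_take, hlen, List.length_nil] at hlt
            omega
          | cons p ps => exact ⟨p, ps, rfl⟩
        rw [hps, PySem.Chars.join_cons_cons]
        have hih := ih (k + 1) [] (by omega) hcnt
        rw [hps] at hih
        simp only [List.reverse_nil, List.nil_append] at hih
        have hstep : (cur.reverse ++ ['.'] ++ PySem.Chars.join ['.'] (p :: ps)) ++ ['.']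
            = cur.reverse ++ ('.' :: (PySem.Chars.join ['.'] (p :: ps) ++ ['.'])) := by
          simp
        rw [hstep, hih]
        norm_num
    · have hcnt : k ≤ rest.count '.' := by
        rw [List.count_cons_of_ne (by simpa using hdot)] at h2; exact h2
      match k with
      | k + 1 =>
        rw [pvParts, if_neg hdot, pvCut, if_neg hdot, ih (k + 1) (c :: cur) (by omega) hcnt]
        simp

theorem pvCut_of_few (l : List Char) : ∀ k, l.count '.' < k → pvCut l k = l := by
  induction l with
  | nil => intro k _; simp [pvCut]
  | cons c rest ih =>
    intro k hk
    by_cases hdot : c = '.'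
    · subst hdot
      rw [List.count_cons_self] at hk
      rw [pvCut, if_pos rfl, if_neg (by omega : ¬ (k = 1)), ih (k - 1) (by omega)]
    · rw [List.count_cons_of_ne (by simpa using hdot)] at hk
      rw [pvCut, if_neg hdot, ih k hk]

-- B, as a list computation, equals pvCut _ 4
theorem pvB_eq_cut (cs : List Char) :
    (if (pvParts 4 cs []).length < 5 then cs
     else PySem.Chars.join ['.'] (PySem.List.slice (pvParts 4 cs []) none (some 4)) ++ ['.'])
    = pvCut cs 4 := by
  have hlen := pvParts_length cs 4 []
  by_cases hd : cs.count '.' < 4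
  · rw [if_pos (by omega), pvCut_of_few cs 4 hd]
  · rw [if_neg (by omega)]
    have hslice : PySem.List.slice (pvParts 4 cs []) none (some 4)
        = List.take 4 (pvParts 4 cs []) := by
      simp [PySem.List.slice, PySem.List.clampIdx]
    rw [hslice]
    have := pvJoin_take_eq_cut cs 4 [] (by omega) (by omega)
    simpa using this

-- ===== VERDICT (by name: the statement is the Claim_ definition above) =====
theorem simplifyParagraph_spec : Claim_equal_simplifyParagraph := by
  intro string _
  unfold Spec_simplifyParagraph simplifyParagraph simplifyParagraph_alt
  rw [← String.toList_inj]
  set cs := string.toList with hcs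
  have hgo : PySem.Chars.splitOnMax cs ['.'] 4 = pvParts 4 cs [] := by
    rw [PySem.Chars.splitOnMax]
    rw [if_neg (by norm_num)]
    rw [pvGo_eq_parts (cs.length + 1) cs ((4 : Int).toNat) [] [] (by omega)]
    simp
  have hA : (PySem.Str.slice string (some 0)
      (some ((simplifyParagraphLoop cs 0 0 : Nat) : Int))).toList
      = List.take (simplifyParagraphLoop cs 0 0) cs := by
    rw [PySem.Str.toList_slice, PySem.Chars.slice_eq_listSlice]
    simp [PySem.List.slice_to_natCast, ← hcs]
  simp only [hgo]
  by_cases hlt : (pvParts 4 cs []).length < 5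
  · rw [if_pos hlt]
    rw [hA, pvA_eq_cut cs 0 (by omega)]
    have := pvB_eq_cut cs
    rw [if_pos hlt] at this
    rw [← hcs]
    exact this.symm
  · rw [if_neg hlt]
    rw [hA, pvA_eq_cut cs 0 (by omega)]
    have := pvB_eq_cut cs
    rw [if_neg hlt] at this
    simp only [String.toList_ofList]
    simpa using this.symm
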